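-- pv_equiv track=rewrite | github.com/tn3w/is-crawler | is_crawler/__init__.py | _strip_parens
-- ===== SOURCE A (Python) =====
-- def _strip_parens(ua: str) -> str:
--     open_i = ua.find("(")
--     if open_i == -1:
--         return ua
--
--     parts = []
--     start = 0
--     while open_i != -1:
--         parts.append(ua[start:open_i])
--         close_i = ua.find(")", open_i + 1)
--         start = close_i + 1 if close_i != -1 else len(ua)
--         open_i = ua.find("(", start)
--     parts.append(ua[start:])
--     return " ".join(parts)
-- ===== SOURCE B (Python) =====
-- def _strip_parens(ua: str) -> str:
--     out = []
--     inside = False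
--     for c in ua:
--         if inside:
--             if c == ')':
--                 inside = False
--         elif c == '(':
--             inside = True
--             out.append(' ')
--         else:
--             out.append(c)
--     return ''.join(out)
-- ===== Notes on version B (the rewrite author's own statement) =====
-- stated objective: simpler
-- what changed: Replaced the find/slice index loop that collects substrings into a parts list joined by spaces with a single character-at-a-time scan carrying an inside-parentheses flag, emitting one space per group.
import Mathlib
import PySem

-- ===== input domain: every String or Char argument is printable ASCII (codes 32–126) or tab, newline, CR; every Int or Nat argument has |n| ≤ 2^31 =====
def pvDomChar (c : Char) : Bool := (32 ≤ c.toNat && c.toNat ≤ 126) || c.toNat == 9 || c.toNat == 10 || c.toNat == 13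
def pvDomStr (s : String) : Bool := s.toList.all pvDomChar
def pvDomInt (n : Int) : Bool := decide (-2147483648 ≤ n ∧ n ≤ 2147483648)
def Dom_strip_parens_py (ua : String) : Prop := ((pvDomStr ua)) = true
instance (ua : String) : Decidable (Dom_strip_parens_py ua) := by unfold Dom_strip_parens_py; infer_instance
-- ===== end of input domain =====

-- B replaces A's find/slice index loop and parts list with a single one-pass scan
-- carrying an inside-parentheses flag (objective: simpler).

-- ===== PORT A =====
-- the while loop; fuel only makes the recursion structural (proved never exhausted on entry)
def stripALoop (cs : List Char) (fuel : Nat) (start open_i : Int)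
    (parts : List (List Char)) : List (List Char) × Int :=
  if open_i = -1 then (parts, start)
  else
    match fuel with
    | 0 => (parts, start)
    | fuel + 1 =>
      let parts' := parts ++ [PySem.List.slice cs (some start) (some open_i)]
      let close_i := PySem.Chars.findFrom cs [')'] (open_i + 1) none
      let start' := if close_i ≠ -1 then close_i + 1 else (cs.length : Int)
      stripALoop cs fuel start' (PySem.Chars.findFrom cs ['('] start' none) parts'

def stripAChars (cs : List Char) : List Char :=
  let open0 := PySem.Chars.find cs ['(']
  if open0 = -1 then cs
  else
    let r := stripALoop cs (cs.length + 1) 0 open0 []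
    PySem.Chars.join [' '] (r.1 ++ [PySem.List.slice cs (some r.2) none])

def strip_parens_py (ua : String) : String := String.mk (stripAChars ua.toList)

-- ===== PORT B =====
-- one step of Source B's for loop: state = (inside, out); out collects 1-char strings
def stripBStep (st : Bool × List (List Char)) (c : Char) : Bool × List (List Char) :=
  if st.1 then (if c = ')' then (false, st.2) else st)
  else if c = '(' then (true, st.2 ++ [[' ']])
  else (false, st.2 ++ [[c]])

def strip_parens_py_alt (ua : String) : String :=
  String.mk (PySem.Chars.join [] ((ua.toList.foldl stripBStep (false, [])).2))

-- ===== PRECONDITION & SPEC =====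
def Spec_strip_parens_py (ua : String) (out : String) : Prop := out = strip_parens_py_alt ua
instance (ua : String) (out : String) : Decidable (Spec_strip_parens_py ua out) := by unfold Spec_strip_parens_py; infer_instance

-- ===== CLAIM (what is proved, stated in full; the proofs are below) =====
def Claim_equal_strip_parens_py : Prop := ∀ (ua : String), Dom_strip_parens_py ua → Spec_strip_parens_py ua (strip_parens_py ua)

-- ===== LEMMAS AND PROOFS =====

-- common specification: the suffix after the first ')' ([] if none)
def specAfter : List Char → List Char
  | [] => []
  | c :: cs => if c = ')' then cs else specAfter cs

theorem specAfter_length_le (ys : List Char) : (specAfter ys).length ≤ ys.length := by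
  induction ys with
  | nil => simp [specAfter]
  | cons c cs ih =>
    simp only [specAfter]
    split
    · simp
    · simpa using Nat.le_succ_of_le ih

-- the parts list that A builds and " ".join's
def specParts (xs : List Char) : List (List Char) :=
  if _h : '(' ∈ xs then
    xs.takeWhile (· ≠ '(') :: specParts (specAfter ((xs.dropWhile (· ≠ '(')).tail))
  else [xs]
termination_by xs.length
decreasing_by
  have h1 := specAfter_length_le ((xs.dropWhile (· ≠ '(')).tail)
  have h2 : xs.dropWhile (· ≠ '(') ≠ [] := fun hnil => by
    have := (List.dropWhile_eq_nil_iff).mp hnil '(' _h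
    simp at this
  have h3 : (xs.dropWhile (· ≠ '(')).length ≤ xs.length := List.length_dropWhile_le _ _
  have h5 : 0 < (xs.dropWhile (· ≠ '(')).length := List.length_pos_of_ne_nil h2
  have h7 : ((xs.dropWhile (· ≠ '(')).tail).length = (xs.dropWhile (· ≠ '(')).length - 1 :=
    List.length_tail
  omega

theorem specParts_ne_nil (xs : List Char) : specParts xs ≠ [] := by
  rw [specParts]; split <;> simp

theorem specParts_not_mem {xs : List Char} (h : '(' ∉ xs) : specParts xs = [xs] := by
  rw [specParts]; simp [h]

theorem specAfter_not_mem {ys : List Char} (h : ')' ∉ ys) : specAfter ys = [] := by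
  induction ys with
  | nil => rfl
  | cons c cs ih =>
    simp only [List.mem_cons, not_or] at h
    rw [specAfter, if_neg (fun hc => h.1 hc.symm)]
    exact ih h.2

theorem specAfter_decomp {q : List Char} (r : List Char) (hq : ')' ∉ q) :
    specAfter (q ++ ')' :: r) = r := by
  induction q with
  | nil => simp [specAfter]
  | cons c cs ih =>
    simp only [List.mem_cons, not_or] at hq
    rw [List.cons_append, specAfter, if_neg (fun hc => hq.1 hc.symm)]
    exact ih hq.2

theorem takeWhile_first {c : Char} {p : List Char} (r : List Char) (hp : c ∉ p) :
    (p ++ c :: r).takeWhile (· ≠ c) = p ∧ (p ++ c :: r).dropWhile (· ≠ c) = c :: r := by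
  induction p with
  | nil => simp
  | cons a as ih =>
    simp only [List.mem_cons, not_or] at hp
    have ha : decide (a ≠ c) = true := by simp [Ne.symm hp.1]
    have ihr := ih hp.2
    constructor
    · simp only [List.cons_append, List.takeWhile_cons, ha, if_true]
      rw [ihr.1]
    · simp only [List.cons_append, List.dropWhile_cons, ha, if_true]
      exact ihr.2

theorem specParts_decomp {p : List Char} (r : List Char) (hp : '(' ∉ p) :
    specParts (p ++ '(' :: r) = p :: specParts (specAfter r) := by
  have hmem : '(' ∈ p ++ '(' :: r := by simp
  obtain ⟨ht, hd⟩ := takeWhile_first (c := '(') r hp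
  rw [specParts, dif_pos hmem, ht, hd]
  simp

-- first-occurrence decomposition of Chars.find for a single-character needle
theorem infix_singleton {c : Char} {xs : List Char} : [c] <:+: xs ↔ c ∈ xs := by
  constructor
  · intro h
    exact (List.singleton_sublist).mp h.sublist
  · intro h
    obtain ⟨p, t, rfl⟩ := List.append_of_mem h
    exact ⟨p, t, by simp⟩

theorem find_singleton_neg {c : Char} {xs : List Char} (h : c ∉ xs) :
    PySem.Chars.find xs [c] = -1 :=
  (PySem.Chars.find_eq_neg_one_iff xs [c]).mpr (fun hi => h (infix_singleton.mp hi))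

theorem find_first {c : Char} {xs : List Char} (h : c ∈ xs) :
    ∃ p r, xs = p ++ c :: r ∧ c ∉ p ∧ PySem.Chars.find xs [c] = (p.length : Int) := by
  have hinf : [c] <:+: xs := infix_singleton.mpr h
  have hnn : 0 ≤ PySem.Chars.find xs [c] := (PySem.Chars.find_nonneg_iff xs [c]).mpr hinf
  obtain ⟨hpre, hmin⟩ := PySem.Chars.find_spec hnn
  set n := (PySem.Chars.find xs [c]).toNat with hn
  obtain ⟨t, ht⟩ := hpre
  have hnl : n < xs.length := by
    have : xs.drop n ≠ [] := by rw [← ht]; simp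
    by_contra hc
    exact this (List.drop_eq_nil_of_le (by omega))
  refine ⟨xs.take n, t, ?_, ?_, ?_⟩
  · conv_lhs => rw [← List.take_append_drop n xs]
    rw [← ht]; simp
  · intro hc
    obtain ⟨m, hm, he⟩ := List.getElem_of_mem hc
    have hmn : m < n := by
      have := hm; simp only [List.length_take] at this; omega
    have hmx : m < xs.length := by omega
    have hx : xs[m] = c := by rw [← he]; exact (List.getElem_take).symm ▸ rfl
    apply hmin m hmn
    refine ⟨xs.drop (m + 1), ?_⟩
    rw [List.drop_eq_getElem_cons hmx, hx]; rfl
  · have : (xs.take n).length = n := by simp; omega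
    rw [this, hn, Int.toNat_of_nonneg hnn]

-- the recursive form of Source B's scan
def bGo : Bool → List Char → List Char
  | _, [] => []
  | true, c :: cs => if c = ')' then bGo false cs else bGo true cs
  | false, c :: cs => if c = '(' then ' ' :: bGo true cs else c :: bGo false cs

theorem foldl_stripBStep (cs : List Char) : ∀ (b : Bool) (out : List (List Char)),
    (cs.foldl stripBStep (b, out)).2 = out ++ (bGo b cs).map (fun c => [c]) := by
  induction cs with
  | nil => intro b out; simp [bGo]
  | cons c cs ih =>
    intro b out
    cases b with
    | true =>
      by_cases hc : c = ')'
      · simp [stripBStep, bGo, hc, ih]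
      · simp [stripBStep, bGo, hc, ih]
    | false =>
      by_cases hc : c = '('
      · simp [stripBStep, bGo, hc, ih]
      · simp [stripBStep, bGo, hc, ih]

theorem bGo_true_eq (r : List Char) : bGo true r = bGo false (specAfter r) := by
  induction r with
  | nil => rfl
  | cons c cs ih =>
    by_cases hc : c = ')'
    · simp [bGo, specAfter, hc]
    · simp [bGo, specAfter, hc, ih]

theorem bGo_false_not_mem {xs : List Char} (h : '(' ∉ xs) : bGo false xs = xs := by
  induction xs with
  | nil => rfl
  | cons c cs ih =>
    simp only [List.mem_cons, not_or] at h
    simp [bGo, Ne.symm h.1, ih h.2]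

theorem bGo_false_prefix {p : List Char} (r : List Char) (hp : '(' ∉ p) :
    bGo false (p ++ '(' :: r) = p ++ ' ' :: bGo true r := by
  induction p with
  | nil => simp [bGo]
  | cons a as ih =>
    simp only [List.mem_cons, not_or] at hp
    simp [bGo, Ne.symm hp.1, ih hp.2]

theorem bGo_false_join : ∀ (n : Nat) (xs : List Char), xs.length ≤ n →
    bGo false xs = PySem.Chars.join [' '] (specParts xs) := by
  intro n
  induction n with
  | zero =>
    intro xs hx
    have : xs = [] := List.eq_nil_of_length_eq_zero (by omega)
    subst this
    rw [bGo, specParts_not_mem (by simp), PySem.Chars.join_singleton]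
  | succ n ih =>
    intro xs hx
    by_cases h : '(' ∈ xs
    · obtain ⟨p, r, rfl, hp, _⟩ := find_first h
      have hlen : (specAfter r).length ≤ n := by
        have h1 := specAfter_length_le r
        have h2 : (p ++ '(' :: r).length = p.length + 1 + r.length := by simp; omega
        omega
      rw [bGo_false_prefix r hp, specParts_decomp r hp, bGo_true_eq, ih _ hlen]
      obtain ⟨y, ys, hy⟩ : ∃ y ys, specParts (specAfter r) = y :: ys := by
        cases hsp : specParts (specAfter r) with
        | nil => exact absurd hsp (specParts_ne_nil _)
        | cons y ys => exact ⟨y, ys, rfl⟩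
      rw [hy, PySem.Chars.join_cons_cons]
      simp
    · rw [bGo_false_not_mem h, specParts_not_mem h, PySem.Chars.join_singleton]

-- A's while loop computes specParts of the remaining suffix
theorem loopA (cs : List Char) : ∀ (fuel s : Nat) (parts : List (List Char)),
    s ≤ cs.length → cs.length - s < fuel →
    (stripALoop cs fuel ↑s (PySem.Chars.findFrom cs ['('] ↑s none) parts).1
      ++ [PySem.List.slice cs (some (stripALoop cs fuel ↑s (PySem.Chars.findFrom cs ['('] ↑s none) parts).2) none]
    = parts ++ specParts (cs.drop s) := by
  intro fuel
  induction fuel with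
  | zero => intro s parts hs hf; omega
  | succ fuel ih =>
    intro s parts hs hf
    have hk := PySem.Chars.findFrom_natCast cs ['('] s hs
    by_cases hmem : '(' ∈ cs.drop s
    · obtain ⟨p, r, hdrop, hp, hfind⟩ := find_first hmem
      have hdl : (cs.drop s).length = cs.length - s := List.length_drop
      have hlen : cs.length = s + p.length + 1 + r.length := by
        have : (cs.drop s).length = p.length + 1 + r.length := by rw [hdrop]; simp; omega
        omega
      have hne : PySem.Chars.find (cs.drop s) ['('] ≠ -1 := by rw [hfind]; omega
      have hop : PySem.Chars.findFrom cs ['('] ↑s none = ((s + p.length : Nat) : Int) := by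
        rw [hk, if_neg hne, hfind]; push_cast; ring
      have hopne : PySem.Chars.findFrom cs ['('] ↑s none ≠ -1 := by rw [hop]; omega
      rw [hop]
      simp only [stripALoop, if_neg (by omega : ((s + p.length : Nat) : Int) ≠ -1)]
      have hslice : PySem.List.slice cs (some ↑s) (some ((s + p.length : Nat) : Int)) = p := by
        have : ((s + p.length : Nat) : Int) = (s : Int) + (p.length : Int) := by push_cast; ring
        rw [this, PySem.List.slice_natCast_add, hdrop, List.take_left]
      have hdrop2 : cs.drop (s + p.length + 1) = r := by
        have h1 : cs.drop (s + (p.length + 1)) = (cs.drop s).drop (p.length + 1) := by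
          rw [List.drop_drop]
        have h2 : (p ++ '(' :: r).drop (p.length + 1) = r := by
          have : p ++ '(' :: r = (p ++ ['(']) ++ r := by simp
          rw [this]
          have : p.length + 1 = (p ++ ['(']).length := by simp
          rw [this, List.drop_left]
        have : s + p.length + 1 = s + (p.length + 1) := by omega
        rw [this, h1, hdrop, h2]
      have hcast1 : ((s + p.length : Nat) : Int) + 1 = ((s + p.length + 1 : Nat) : Int) := by
        push_cast; ring
      have hk2 := PySem.Chars.findFrom_natCast cs [')'] (s + p.length + 1) (by omega)
      by_cases hrm : ')' ∈ r
      · obtain ⟨q, r2, hr, hq, hfr⟩ := find_first hrm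
        have hrlen : r.length = q.length + 1 + r2.length := by rw [hr]; simp; omega
        have hclose : PySem.Chars.findFrom cs [')'] (((s + p.length : Nat) : Int) + 1) none
            = ((s + p.length + 1 + q.length : Nat) : Int) := by
          rw [hcast1, hk2, hdrop2, if_neg (by rw [hfr]; omega), hfr]; push_cast; ring
        rw [hclose]
        have hs2 : s + p.length + 1 + q.length + 1 ≤ cs.length := by omega
        have hstart : ((s + p.length + 1 + q.length : Nat) : Int) + 1
            = ((s + p.length + 1 + q.length + 1 : Nat) : Int) := by push_cast; ring
        simp only [if_pos (by omega : ((s + p.length + 1 + q.length : Nat) : Int) ≠ -1), hstart]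
        have hih := ih (s + p.length + 1 + q.length + 1)
          (parts ++ [PySem.List.slice cs (some ↑s) (some ((s + p.length : Nat) : Int))])
          hs2 (by omega)
        rw [hih, hslice]
        have hdrop3 : cs.drop (s + p.length + 1 + q.length + 1) = r2 := by
          have h1 : s + p.length + 1 + q.length + 1 = (s + p.length + 1) + (q.length + 1) := by omega
          have h2 : cs.drop ((s + p.length + 1) + (q.length + 1))
              = (cs.drop (s + p.length + 1)).drop (q.length + 1) := by rw [List.drop_drop]
          have h3 : (q ++ ')' :: r2).drop (q.length + 1) = r2 := by
            have e1 : q ++ ')' :: r2 = (q ++ [')']) ++ r2 := by simp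
            have e2 : q.length + 1 = (q ++ [')']).length := by simp
            rw [e1, e2, List.drop_left]
          rw [h1, h2, hdrop2, hr, h3]
        rw [hdrop3, hdrop, specParts_decomp r hp, hr, specAfter_decomp r2 hq]
        simp
      · have hclose : PySem.Chars.findFrom cs [')'] (((s + p.length : Nat) : Int) + 1) none = -1 := by
          rw [hcast1, hk2, hdrop2, if_pos (find_singleton_neg hrm)]
        rw [hclose]
        simp only [ne_eq, not_true_eq_false, reduceIte]
        have hlencast : (cs.length : Int) = ((cs.length : Nat) : Int) := rfl
        have hih := ih cs.length
          (parts ++ [PySem.List.slice cs (some ↑s) (some ((s + p.length : Nat) : Int))])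
          (le_refl _) (by omega)
        rw [hih, hslice]
        rw [List.drop_length, hdrop, specParts_decomp r hp, specAfter_not_mem hrm,
          specParts_not_mem (by simp)]
        simp
    · have hfneg : PySem.Chars.findFrom cs ['('] ↑s none = -1 := by
        rw [hk, if_pos (find_singleton_neg hmem)]
      have hstop : stripALoop cs (fuel + 1) (↑s) (-1) parts = (parts, ↑s) := by
        simp [stripALoop]
      rw [hfneg, hstop]
      rw [PySem.List.slice_from_natCast, specParts_not_mem hmem]

theorem main_lists (cs : List Char) :
    stripAChars cs = PySem.Chars.join [] ((cs.foldl stripBStep (false, [])).2) := by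
  rw [foldl_stripBStep cs false [], List.nil_append, PySem.Chars.join_nil_singletons,
    bGo_false_join cs.length cs (le_refl _)]
  simp only [stripAChars]
  by_cases h : '(' ∈ cs
  · have hne : PySem.Chars.find cs ['('] ≠ -1 := by
      obtain ⟨p, r, _, _, hf⟩ := find_first h
      rw [hf]; omega
    rw [if_neg hne]
    have h0 : PySem.Chars.find cs ['('] = PySem.Chars.findFrom cs ['('] ((0 : Nat) : Int) none := by
      rw [PySem.Chars.findFrom_natCast cs ['('] 0 (by omega)]
      simp [hne]
    have := loopA cs (cs.length + 1) 0 [] (by omega) (by omega)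
    rw [List.drop_zero, List.nil_append] at this
    have e : (0 : Int) = ((0 : Nat) : Int) := rfl
    rw [e, h0, this]
  · rw [if_pos (find_singleton_neg h), specParts_not_mem h, PySem.Chars.join_singleton]

-- ===== VERDICT (by name: the statement is the Claim_ definition above) =====
theorem strip_parens_py_spec : Claim_equal_strip_parens_py := by
  intro ua _
  unfold Spec_strip_parens_py strip_parens_py strip_parens_py_alt
  rw [main_lists]
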